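-- pv_equiv track=rewrite | github.com/Zimmer-lab/neumandy | neumandy/modeling/cdlds/train_sweep_0210_ALL_TRUE_with_control2.py | find_highlight_regions
-- ===== SOURCE A (Python) =====
-- def find_highlight_regions(states):
--     regions = []
--     start = None
--     for i in range(len(states)):
--         if states[i] == 1 and start is None:
--             start = i
--         elif states[i] == 0 and start is not None:
--             regions.append((start, i - 1))
--             start = None
--     # If the states array ends with a 1, capture that region as well
--     if start is not None:
--         regions.append((start, len(states) - 1))
--     return regions
-- ===== SOURCE B (Python) =====
-- def find_highlight_regions(states):
--     # Pass 1: forward-fill an 'active' boolean array (1 opens, 0 closes, others carry).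
--     active = []
--     prev = False
--     for s in states:
--         if s == 1:
--             prev = True
--         elif s == 0:
--             prev = False
--         active.append(prev)
--     # Pass 2: collect maximal contiguous runs of True as inclusive (start, end).
--     regions = []
--     n = len(active)
--     i = 0
--     while i < n:
--         if not active[i]:
--             i += 1
--             continue
--         j = i
--         while j < n and active[j]:
--             j += 1
--         regions.append((i, j - 1))
--         i = j
--     return regions
-- ===== Notes on version B (the rewrite author's own statement) =====
-- stated objective: alternative
-- what changed: Replaces A's single-pass start/None state machine by two passes: a forward-fill producing a boolean active array, then a run-collector that scans active and emits maximal True runs as inclusive (start,end) pairs.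
import Mathlib
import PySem

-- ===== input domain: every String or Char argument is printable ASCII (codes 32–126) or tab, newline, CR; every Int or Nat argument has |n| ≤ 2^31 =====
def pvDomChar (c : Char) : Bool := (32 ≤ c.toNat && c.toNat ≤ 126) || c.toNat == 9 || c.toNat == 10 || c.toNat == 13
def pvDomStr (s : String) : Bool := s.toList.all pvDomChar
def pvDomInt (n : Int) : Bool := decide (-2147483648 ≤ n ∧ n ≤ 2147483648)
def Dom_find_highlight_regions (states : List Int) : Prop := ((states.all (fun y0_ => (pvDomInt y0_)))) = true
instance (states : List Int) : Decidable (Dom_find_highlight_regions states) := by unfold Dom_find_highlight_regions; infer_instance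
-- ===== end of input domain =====

-- B replaces A's single-pass start/None state machine by a two-pass decomposition
-- (forward-fill boolean 'active' array, then collect maximal True runs); alternative, not faster.

-- ===== PORT A =====
-- the for-loop of A: state (regions, start), index i over states
def findA_loop : List Int → Nat → List (Int × Int) → Option Nat → List (Int × Int) × Option Nat
  | [], _, regions, start => (regions, start)
  | s :: rest, i, regions, start =>
    if s = 1 ∧ start = none then findA_loop rest (i + 1) regions (some i)
    else if s = 0 ∧ start ≠ none then
      findA_loop rest (i + 1) (regions ++ [(((start.getD 0 : Nat) : Int), (i : Int) - 1)]) none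
    else findA_loop rest (i + 1) regions start

def find_highlight_regions (states : List Int) : List (Int × Int) :=
  match findA_loop states 0 [] none with
  | (regions, some st) => regions ++ [((st : Int), (states.length : Int) - 1)]
  | (regions, none) => regions

-- ===== PORT B =====
-- pass 1: forward-fill the boolean active array (1 opens, 0 closes, others carry prev)
def fillB : List Int → Bool → List Bool
  | [], _ => []
  | s :: rest, prev =>
    let cur := if s = 1 then true else if s = 0 then false else prev
    cur :: fillB rest cur

-- pass 2: collect maximal contiguous runs of True as inclusive (start, end)
def runsB : List Bool → Nat → List (Int × Int)
  | [], _ => []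
  | false :: rest, i => runsB rest (i + 1)
  | true :: rest, i =>
    let k := (rest.takeWhile id).length
    ((i : Int), (i : Int) + (k : Int)) :: runsB (rest.drop k) (i + k + 1)
termination_by l _ => l.length
decreasing_by all_goals simp

def find_highlight_regions_alt (states : List Int) : List (Int × Int) :=
  runsB (fillB states false) 0

-- ===== PRECONDITION & SPEC =====
def Spec_find_highlight_regions (states : List Int) (out : List (Int × Int)) : Prop := out = find_highlight_regions_alt states
instance (states : List Int) (out : List (Int × Int)) : Decidable (Spec_find_highlight_regions states out) := by unfold Spec_find_highlight_regions; infer_instance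

-- ===== CLAIM (what is proved, stated in full; the proofs are below) =====
def Claim_equal_find_highlight_regions : Prop := ∀ (states : List Int), Dom_find_highlight_regions states → Spec_find_highlight_regions states (find_highlight_regions states)

-- ===== LEMMAS AND PROOFS =====

-- A's loop followed by the trailing append, as one function of the loop state
def finishA (rest : List Int) (i : Nat) (regs : List (Int × Int)) (start : Option Nat) : List (Int × Int) :=
  match findA_loop rest i regs start with
  | (r, some st) => r ++ [((st : Int), (i : Int) + (rest.length : Int) - 1)]
  | (r, none) => r

-- number of leading Trues that forward-filling with carry=true produces
def kkB (rest : List Int) : Nat := ((fillB rest true).takeWhile id).length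

lemma finishA_top (states : List Int) :
    find_highlight_regions states = finishA states 0 [] none := by
  unfold find_highlight_regions finishA
  cases h : findA_loop states 0 [] none with
  | mk r st =>
    cases st <;> simp

lemma finishA_step1 (s : Int) (rest : List Int) (i : Nat) (regs : List (Int × Int))
    (hs : s = 1) :
    finishA (s :: rest) i regs none = finishA rest (i + 1) regs (some i) := by
  unfold finishA
  rw [show findA_loop (s :: rest) i regs none = findA_loop rest (i+1) regs (some i) by
    simp [findA_loop, hs]]
  cases h : findA_loop rest (i + 1) regs (some i) with
  | mk r st =>
    cases st with
    | none => simp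
    | some v => simp; ring_nf

lemma finishA_step0 (s : Int) (rest : List Int) (i : Nat) (regs : List (Int × Int)) (st : Nat)
    (hs : s = 0) :
    finishA (s :: rest) i regs (some st)
      = finishA rest (i + 1) (regs ++ [((st : Int), (i : Int) - 1)]) none := by
  unfold finishA
  rw [show findA_loop (s :: rest) i regs (some st)
      = findA_loop rest (i+1) (regs ++ [((st : Int), (i : Int) - 1)]) none by
    simp [findA_loop, hs]]
  cases h : findA_loop rest (i + 1) (regs ++ [((st : Int), (i : Int) - 1)]) none with
  | mk r st' =>
    cases st' with
    | none => simp
    | some v => simp; ring_nf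

lemma finishA_skip (s : Int) (rest : List Int) (i : Nat) (regs : List (Int × Int))
    (start : Option Nat)
    (h1 : ¬ (s = 1 ∧ start = none)) (h2 : ¬ (s = 0 ∧ start ≠ none)) :
    finishA (s :: rest) i regs start = finishA rest (i + 1) regs start := by
  unfold finishA
  rw [show findA_loop (s :: rest) i regs start = findA_loop rest (i+1) regs start by
    simp [findA_loop, h1, h2]]
  cases h : findA_loop rest (i + 1) regs start with
  | mk r st' =>
    cases st' with
    | none => simp
    | some v => simp; ring_nf

-- after the leading Trues, the fill carried with true agrees with refilling with false
lemma fill_drop (rest : List Int) :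
    (fillB rest true).drop (kkB rest) = fillB (rest.drop (kkB rest)) false := by
  induction rest with
  | nil => simp [kkB, fillB]
  | cons s rest ih =>
    by_cases hs0 : s = 0
    · simp [kkB, fillB, hs0]
    · by_cases hs1 : s = 1 <;>
        simpa [kkB, fillB, hs0, hs1] using ih

lemma kkB_cons_true (s : Int) (rest : List Int) (hs0 : s ≠ 0) :
    kkB (s :: rest) = kkB rest + 1 := by
  by_cases hs1 : s = 1 <;> simp [kkB, fillB, hs0, hs1]

-- the main invariant: A's remaining loop (plus trailing append) equals B's run collector
lemma main_inv (rest : List Int) : ∀ (i : Nat) (regs : List (Int × Int)),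
    (finishA rest i regs none = regs ++ runsB (fillB rest false) i)
    ∧ (∀ st : Nat, finishA rest i regs (some st)
        = regs ++ ((st : Int), (i : Int) + (kkB rest : Int) - 1)
            :: runsB (fillB (rest.drop (kkB rest)) false) (i + kkB rest)) := by
  induction rest with
  | nil =>
    intro i regs
    constructor
    · simp [finishA, findA_loop, fillB, runsB]
    · intro st
      simp [finishA, findA_loop, fillB, runsB, kkB]
  | cons s rest ih =>
    intro i regs
    constructor
    · -- start = none
      by_cases hs1 : s = 1
      · -- open a region at i
        rw [finishA_step1 s rest i regs hs1, (ih (i+1) regs).2 i]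
        have hfill : fillB (s :: rest) false = true :: fillB rest true := by
          simp [fillB, hs1]
        rw [hfill]
        show _ = regs ++ runsB (true :: fillB rest true) i
        rw [show runsB (true :: fillB rest true) i
            = ((i : Int), (i : Int) + (kkB rest : Int))
                :: runsB ((fillB rest true).drop (kkB rest)) (i + kkB rest + 1) from by
          simp [runsB, kkB]]
        rw [fill_drop]
        rw [show i + 1 + kkB rest = i + kkB rest + 1 from by omega]
        rw [show (((i : Nat) : Int), (((i + 1 : Nat) : Nat) : Int) + ((kkB rest : Nat) : Int) - 1)
              = ((i : Int), (i : Int) + (kkB rest : Int)) from by push_cast; ring_nf]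
      · -- s ≠ 1: active stays false, both skip
        have h1 : ¬ (s = 1 ∧ (none : Option Nat) = none) := by simp [hs1]
        have h2 : ¬ (s = 0 ∧ (none : Option Nat) ≠ none) := by simp
        rw [finishA_skip s rest i regs none h1 h2, (ih (i+1) regs).1]
        by_cases hs0 : s = 0 <;> simp [fillB, hs0, hs1, runsB]
    · -- start = some st
      intro st
      by_cases hs0 : s = 0
      · -- close the region at i - 1
        rw [finishA_step0 s rest i regs st hs0, (ih (i+1) (regs ++ [((st : Int), (i : Int) - 1)])).1]
        have hkk : kkB (s :: rest) = 0 := by simp [kkB, fillB, hs0]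
        rw [hkk]
        simp [fillB, hs0, runsB]
      · -- s ≠ 0: region stays open, fill carries true
        have h1 : ¬ (s = 1 ∧ (some st : Option Nat) = none) := by simp
        have h2 : ¬ (s = 0 ∧ (some st : Option Nat) ≠ none) := by simp [hs0]
        rw [finishA_skip s rest i regs (some st) h1 h2, (ih (i+1) regs).2 st]
        rw [kkB_cons_true s rest hs0]
        have hdrop : (s :: rest).drop (kkB rest + 1) = rest.drop (kkB rest) := by simp
        rw [hdrop]
        rw [show i + 1 + kkB rest = i + (kkB rest + 1) from by omega]
        rw [show ((st : Int), (((i + 1 : Nat) : Nat) : Int) + ((kkB rest : Nat) : Int) - 1)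
              = ((st : Int), (i : Int) + (((kkB rest + 1 : Nat) : Nat) : Int) - 1) from by push_cast; ring_nf]

-- ===== VERDICT (by name: the statement is the Claim_ definition above) =====
theorem find_highlight_regions_spec : Claim_equal_find_highlight_regions := by
  intro states _
  unfold Spec_find_highlight_regions find_highlight_regions_alt
  rw [finishA_top, (main_inv states 0 []).1]
  simp
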